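-- pv_equiv track=rewrite | github.com/Wikia/wiva | mediawiki/__init__.py | __fix_broken_url_encodes
-- ===== SOURCE A (Python) =====
-- def __fix_broken_url_encodes(s):
--     def is_hex_char(z):
--         z = z.lower()
--         return '0' <= z <= '9' or 'a' <= z <= 'f'
--
--     c = list(s)
--     l = len(c)
--     for i in range(l):
--         if c[i] == '%':
--             h = c[i + 1:i + 3]
--             if len(h) < 2 or not is_hex_char(h[0]) or not is_hex_char(h[1]):
--                 c[i] = '%25'
--     return ''.join(c)
-- ===== SOURCE B (Python) =====
-- def __fix_broken_url_encodes(s):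
--     hexd = set('0123456789abcdefABCDEF')
--     out = []
--     run = 0  # length of the run of hex digits immediately after the current position
--     for ch in reversed(s):
--         if ch == '%':
--             out.append('%' if run >= 2 else '%25')
--         else:
--             out.append(ch)
--         run = run + 1 if ch in hexd else 0
--     out.reverse()
--     return ''.join(out)
-- ===== Notes on version B (the rewrite author's own statement) =====
-- stated objective: alternative
-- what changed: Replaces the index loop with in-place list mutation and two-character slicing at each percent sign by a single reverse pass that maintains a running count of consecutive hex digits after the current position, deciding each percent sign from that counter with no indexing or slicing.
import Mathlib
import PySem

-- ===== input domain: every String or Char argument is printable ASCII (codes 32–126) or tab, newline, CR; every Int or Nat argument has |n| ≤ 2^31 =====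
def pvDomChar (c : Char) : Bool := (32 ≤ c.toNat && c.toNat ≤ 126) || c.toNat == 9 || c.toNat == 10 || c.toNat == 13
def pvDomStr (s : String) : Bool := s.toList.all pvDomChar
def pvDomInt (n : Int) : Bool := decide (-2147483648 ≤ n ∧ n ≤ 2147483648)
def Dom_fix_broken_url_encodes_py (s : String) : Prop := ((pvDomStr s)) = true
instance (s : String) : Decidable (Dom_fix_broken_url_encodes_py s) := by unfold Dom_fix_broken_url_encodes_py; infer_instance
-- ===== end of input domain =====

-- B replaces A's forward index loop (in-place list mutation + two-character slices at each percent sign)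
-- by a single reverse pass that keeps a counter of consecutive hex digits after the current
-- position (objective: alternative; same O(n) cost).

-- ===== PORT A =====
-- is_hex_char(z): z = z.lower(); return '0' <= z <= '9' or 'a' <= z <= 'f'   (z a 1-char string)
def pvIsHexCharS (z : String) : Bool :=
  let z := PySem.Str.lower z
  (decide ("0" ≤ z) && decide (z ≤ "9")) || (decide ("a" ≤ z) && decide (z ≤ "f"))

def fix_broken_url_encodes_py (s : String) : String :=
  let c : List String := s.toList.map (fun ch => String.ofList [ch])
  let l : Int := (c.length : Int)
  let c := (PySem.List.pyRange 0 l 1).foldl (fun c i =>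
    if PySem.List.pyGetD c i "" = "%" then
      let h := PySem.List.slice c (some (i + 1)) (some (i + 3))
      if decide (h.length < 2) || !pvIsHexCharS (PySem.List.pyGetD h 0 "")
          || !pvIsHexCharS (PySem.List.pyGetD h 1 "") then
        PySem.List.pySetD c i "%25"
      else c
    else c) c
  PySem.Str.join "" c

-- ===== PORT B =====
def pvHexSet : PySem.Set Char := PySem.Set.ofList (String.toList "0123456789abcdefABCDEF")

def fix_broken_url_encodes_py_alt (s : String) : String :=
  let r := s.toList.reverse.foldl (fun (st : List String × Nat) ch =>
    let out := st.1 ++ [if ch = '%' then (if 2 ≤ st.2 then "%" else "%25")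
                        else String.ofList [ch]]
    (out, if PySem.Set.contains pvHexSet ch then st.2 + 1 else 0)) ([], 0)
  PySem.Str.join "" r.1.reverse

-- ===== PRECONDITION & SPEC =====
def Spec_fix_broken_url_encodes_py (s : String) (out : String) : Prop := out = fix_broken_url_encodes_py_alt s
instance (s : String) (out : String) : Decidable (Spec_fix_broken_url_encodes_py s out) := by unfold Spec_fix_broken_url_encodes_py; infer_instance

-- ===== CLAIM (what is proved, stated in full; the proofs are below) =====
def Claim_equal_fix_broken_url_encodes_py : Prop := ∀ (s : String), Dom_fix_broken_url_encodes_py s → Spec_fix_broken_url_encodes_py s (fix_broken_url_encodes_py s)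

-- ===== LEMMAS AND PROOFS =====

theorem char_le_iff (a b : Char) : a ≤ b ↔ a.toNat ≤ b.toNat := by
  rw [Char.le_def]; exact UInt32.le_iff_toNat_le

theorem char_eq_iff (a b : Char) : a = b ↔ a.toNat = b.toNat :=
  ⟨fun h => by rw [h], fun h => by rw [← Char.ofNat_toNat a, h, Char.ofNat_toNat]⟩

theorem mem_hex_iff (c : Char) : (c ∈ pvHexSet) ↔
    (48 ≤ c.toNat ∧ c.toNat ≤ 57) ∨ (97 ≤ c.toNat ∧ c.toNat ≤ 102) ∨ (65 ≤ c.toNat ∧ c.toNat ≤ 70) := by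
  have hl : pvHexSet = ['0','1','2','3','4','5','6','7','8','9','a','b','c','d','e','f','A','B','C','D','E','F'] := by decide
  rw [hl]
  simp only [List.mem_cons, List.not_mem_nil, or_false, char_eq_iff]
  have hc48 : ('0':Char).toNat = 48 := by decide
  have hc49 : ('1':Char).toNat = 49 := by decide
  have hc50 : ('2':Char).toNat = 50 := by decide
  have hc51 : ('3':Char).toNat = 51 := by decide
  have hc52 : ('4':Char).toNat = 52 := by decide
  have hc53 : ('5':Char).toNat = 53 := by decide
  have hc54 : ('6':Char).toNat = 54 := by decide
  have hc55 : ('7':Char).toNat = 55 := by decide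
  have hc56 : ('8':Char).toNat = 56 := by decide
  have hc57 : ('9':Char).toNat = 57 := by decide
  have hc97 : ('a':Char).toNat = 97 := by decide
  have hc98 : ('b':Char).toNat = 98 := by decide
  have hc99 : ('c':Char).toNat = 99 := by decide
  have hc100 : ('d':Char).toNat = 100 := by decide
  have hc101 : ('e':Char).toNat = 101 := by decide
  have hc102 : ('f':Char).toNat = 102 := by decide
  have hc65 : ('A':Char).toNat = 65 := by decide
  have hc66 : ('B':Char).toNat = 66 := by decide
  have hc67 : ('C':Char).toNat = 67 := by decide
  have hc68 : ('D':Char).toNat = 68 := by decide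
  have hc69 : ('E':Char).toNat = 69 := by decide
  have hc70 : ('F':Char).toNat = 70 := by decide
  have hc37 : ('%':Char).toNat = 37 := by decide

  omega

theorem single_le_single (a c : Char) : ([a] ≤ [c]) ↔ a ≤ c := by
  constructor
  · intro h
    rcases le_iff_lt_or_eq.mp h with h | h
    · have h' : List.Lex (· < ·) [a] [c] := h
      exact le_of_lt ((List.lex_singleton_iff a c).mp h')
    · cases h; exact le_refl _
  · intro h
    rcases lt_or_eq_of_le h with h | h
    · exact le_of_lt (show List.Lex (· < ·) [a] [c] from (List.lex_singleton_iff a c).mpr h)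
    · cases h; exact le_refl _

theorem str_single_le (a c : Char) : (String.ofList [a] ≤ String.ofList [c]) ↔ a ≤ c := by
  rw [String.le_iff_toList_le]; simp [single_le_single]

theorem lowerChar_toNat (c : Char) : (PySem.Chars.lowerChar c).toNat =
    if 65 ≤ c.toNat ∧ c.toNat ≤ 90 then c.toNat + 32 else c.toNat := by
  unfold PySem.Chars.lowerChar PySem.Chars.isupper
  have h65 : ('A':Char).toNat = 65 := by decide
  have h90 : ('Z':Char).toNat = 90 := by decide
  simp only [char_le_iff, h65, h90, Bool.and_eq_true, decide_eq_true_eq]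
  split_ifs with h1
  · rw [Char.toNat_ofNat]
    have hv : (c.toNat + 32).isValidChar := by
      unfold Nat.isValidChar; omega
    simp [hv]
  · rfl

theorem hexS_eq (c : Char) :
    pvIsHexCharS (String.ofList [c]) = PySem.Set.contains pvHexSet c := by
  have hmem := mem_hex_iff c
  have hlow := lowerChar_toNat c
  have e0 : ("0" : String) = String.ofList ['0'] := by decide
  have e9 : ("9" : String) = String.ofList ['9'] := by decide
  have ea : ("a" : String) = String.ofList ['a'] := by decide
  have ef : ("f" : String) = String.ofList ['f'] := by decide
  have hc48 : ('0':Char).toNat = 48 := by decide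
  have hc49 : ('1':Char).toNat = 49 := by decide
  have hc50 : ('2':Char).toNat = 50 := by decide
  have hc51 : ('3':Char).toNat = 51 := by decide
  have hc52 : ('4':Char).toNat = 52 := by decide
  have hc53 : ('5':Char).toNat = 53 := by decide
  have hc54 : ('6':Char).toNat = 54 := by decide
  have hc55 : ('7':Char).toNat = 55 := by decide
  have hc56 : ('8':Char).toNat = 56 := by decide
  have hc57 : ('9':Char).toNat = 57 := by decide
  have hc97 : ('a':Char).toNat = 97 := by decide
  have hc98 : ('b':Char).toNat = 98 := by decide
  have hc99 : ('c':Char).toNat = 99 := by decide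
  have hc100 : ('d':Char).toNat = 100 := by decide
  have hc101 : ('e':Char).toNat = 101 := by decide
  have hc102 : ('f':Char).toNat = 102 := by decide
  have hc65 : ('A':Char).toNat = 65 := by decide
  have hc66 : ('B':Char).toNat = 66 := by decide
  have hc67 : ('C':Char).toNat = 67 := by decide
  have hc68 : ('D':Char).toNat = 68 := by decide
  have hc69 : ('E':Char).toNat = 69 := by decide
  have hc70 : ('F':Char).toNat = 70 := by decide
  have hc37 : ('%':Char).toNat = 37 := by decide

  rw [Bool.eq_iff_iff]
  simp only [pvIsHexCharS, PySem.Str.lower, String.toList_ofList, PySem.Chars.lower, List.map,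
    e0, e9, ea, ef, Bool.or_eq_true, Bool.and_eq_true, decide_eq_true_eq,
    str_single_le, char_le_iff, PySem.Set.contains_iff, hlow]
  rw [hmem]
  split_ifs <;> omega

def pvRun : List Char → Nat
  | [] => 0
  | c :: t => if PySem.Set.contains pvHexSet c then pvRun t + 1 else 0

def pvPiece (c : Char) (t : List Char) : String :=
  if c = '%' then (if 2 ≤ pvRun t then "%" else "%25") else String.ofList [c]

def pvPieces : List Char → List String
  | [] => []
  | c :: t => pvPiece c t :: pvPieces t

theorem condA (t : List Char) :
    (decide (((t.map (fun ch => String.ofList [ch])).take 2).length < 2)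
      || !pvIsHexCharS (PySem.List.pyGetD ((t.map (fun ch => String.ofList [ch])).take 2) 0 "")
      || !pvIsHexCharS (PySem.List.pyGetD ((t.map (fun ch => String.ofList [ch])).take 2) 1 ""))
    = !decide (2 ≤ pvRun t) := by
  match t with
  | [] => simp [pvRun]
  | [a] =>
    simp [pvRun]
    split_ifs <;> simp
  | a :: b :: u =>
    have h2 : (2 ≤ pvRun (a :: b :: u)) ↔
        (PySem.Set.contains pvHexSet a = true ∧ PySem.Set.contains pvHexSet b = true) := by
      simp only [pvRun]
      split_ifs with ha hb <;> simp_all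
    have g0 : PySem.List.pyGetD [String.ofList [a], String.ofList [b]] 0 "" = String.ofList [a] :=
      PySem.List.pyGetD_zero_cons _ _ _
    have g1 : PySem.List.pyGetD [String.ofList [a], String.ofList [b]] 1 "" = String.ofList [b] := by
      rw [PySem.List.pyGetD_ofNat' _ 1 ""]; rfl
    simp only [List.map, List.take_succ_cons, List.take_zero, List.take, g0, g1,
      List.length_cons, List.length_nil, hexS_eq]
    have : ¬ ((2:ℕ) < 2) := by omega
    simp only [this, decide_eq_false this, Bool.false_or]
    by_cases ha : PySem.Set.contains pvHexSet a <;> by_cases hb : PySem.Set.contains pvHexSet b <;>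
      simp [ha, hb, h2]

theorem foldA (rest : List Char) (done : List String) :
    (PySem.List.pyRange (done.length : Int) ((done.length : Int) + rest.length) 1).foldl
      (fun c i =>
        if PySem.List.pyGetD c i "" = "%" then
          let h := PySem.List.slice c (some (i + 1)) (some (i + 3))
          if decide (h.length < 2) || !pvIsHexCharS (PySem.List.pyGetD h 0 "")
              || !pvIsHexCharS (PySem.List.pyGetD h 1 "") then
            PySem.List.pySetD c i "%25"
          else c
        else c)
      (done ++ rest.map (fun ch => String.ofList [ch]))
    = done ++ pvPieces rest := by
  induction rest generalizing done with
  | nil => simp [pvPieces]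
  | cons ch t ih =>
    have hlt : (done.length : Int) < (done.length : Int) + (ch :: t).length := by
      simp
    rw [PySem.List.pyRange_one_cons hlt, List.foldl_cons]
    have hstate : done ++ (ch :: t).map (fun ch => String.ofList [ch])
        = done ++ String.ofList [ch] :: t.map (fun ch => String.ofList [ch]) := by
      simp
    have hget : PySem.List.pyGetD (done ++ String.ofList [ch] :: t.map (fun ch => String.ofList [ch])) (done.length : Int) ""
        = String.ofList [ch] := by
      rw [PySem.List.pyGetD_natCast]
      simp [List.getD_eq_getElem?_getD]
    have hcmp : (String.ofList [ch] = "%") ↔ ch = '%' := by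
      constructor
      · intro h
        have := congrArg String.toList h
        simp [String.toList_ofList] at this
        simpa using this
      · rintro rfl; decide
    have hslice : PySem.List.slice (done ++ String.ofList [ch] :: t.map (fun ch => String.ofList [ch]))
          (some ((done.length : Int) + 1)) (some ((done.length : Int) + 3))
        = (t.map (fun ch => String.ofList [ch])).take 2 := by
      have e1 : (done.length : Int) + 1 = ((done.length + 1 : ℕ) : Int) := by push_cast; ring
      have e3 : (done.length : Int) + 3 = ((done.length + 1 : ℕ) : Int) + ((2:ℕ) : Int) := by push_cast; ring
      rw [e1, e3, PySem.List.slice_natCast_add]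
      have : done ++ String.ofList [ch] :: t.map (fun ch => String.ofList [ch])
          = (done ++ [String.ofList [ch]]) ++ t.map (fun ch => String.ofList [ch]) := by simp
      rw [this, List.drop_append]
      simp
    have hset : PySem.List.pySetD (done ++ String.ofList [ch] :: t.map (fun ch => String.ofList [ch]))
          (done.length : Int) "%25"
        = done ++ "%25" :: t.map (fun ch => String.ofList [ch]) := by
      rw [PySem.List.pySetD_natCast]
      rw [List.set_append]
      simp
    have hrange : PySem.List.pyRange ((done.length : Int) + 1) ((done.length : Int) + (ch :: t).length) 1
        = PySem.List.pyRange (((done ++ [pvPiece ch t]).length : ℕ) : Int)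
            ((((done ++ [pvPiece ch t]).length : ℕ) : Int) + t.length) 1 := by
      congr 1 <;> push_cast <;> simp <;> ring
    rw [hstate]
    by_cases hch : ch = '%'
    · subst hch
      have hc : (String.ofList ['%'] = "%") := by decide
      simp only [hget, hc, if_true, hslice, condA t]
      by_cases hr : 2 ≤ pvRun t
      · have hpp : pvPiece '%' t = "%" := by simp [pvPiece, hr]
        simp only [hr, decide_true, Bool.not_true, Bool.false_eq_true, if_false]
        rw [show done ++ ("%":String) :: t.map (fun ch => String.ofList [ch])
            = (done ++ [pvPiece '%' t]) ++ t.map (fun ch => String.ofList [ch]) from by simp [hpp],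
          hrange, ih]
        simp [pvPieces, hpp]
      · have hpp : pvPiece '%' t = "%25" := by simp [pvPiece, hr]
        simp only [hr, decide_false, Bool.not_false, if_true, hset]
        rw [show done ++ "%25" :: t.map (fun ch => String.ofList [ch])
            = (done ++ ["%25"]) ++ t.map (fun ch => String.ofList [ch]) from by simp]
        have hrange' : PySem.List.pyRange ((done.length : Int) + 1) ((done.length : Int) + (('%' :: t).length : ℕ)) 1
            = PySem.List.pyRange (((done ++ ["%25"]).length : ℕ) : Int)
                ((((done ++ ["%25"]).length : ℕ) : Int) + t.length) 1 := by
          congr 1 <;> push_cast <;> simp <;> ring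
        rw [hrange', ih]
        simp [pvPieces, hpp]
    · have hc : ¬ (String.ofList [ch] = "%") := by
        intro h; exact hch (hcmp.mp h)
      simp only [hget, hc, if_false]
      have hpp : pvPiece ch t = String.ofList [ch] := by simp [pvPiece, hch]
      rw [show done ++ String.ofList [ch] :: t.map (fun ch => String.ofList [ch])
          = (done ++ [pvPiece ch t]) ++ t.map (fun ch => String.ofList [ch]) from by simp [hpp],
        hrange, ih]
      simp [pvPieces, hpp]

theorem foldB (cs : List Char) (out0 : List String) :
    cs.reverse.foldl (fun (st : List String × Nat) ch =>
      let out := st.1 ++ [if ch = '%' then (if 2 ≤ st.2 then "%" else "%25")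
                          else String.ofList [ch]]
      (out, if PySem.Set.contains pvHexSet ch then st.2 + 1 else 0)) (out0, 0)
    = (out0 ++ (pvPieces cs).reverse, pvRun cs) := by
  induction cs generalizing out0 with
  | nil => simp [pvPieces, pvRun]
  | cons c t ih =>
    rw [List.reverse_cons, List.foldl_append, ih out0]
    simp [pvPieces, pvPiece, pvRun, List.append_assoc]

-- ===== VERDICT (by name: the statement is the Claim_ definition above) =====
theorem fix_broken_url_encodes_py_spec : Claim_equal_fix_broken_url_encodes_py := by
  intro s _
  unfold Spec_fix_broken_url_encodes_py fix_broken_url_encodes_py fix_broken_url_encodes_py_alt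
  have hA := foldA s.toList []
  have hB := foldB s.toList []
  simp only [List.length_nil, List.nil_append, Nat.cast_zero, zero_add] at hA
  simp only [List.nil_append] at hB
  simp only [List.length_map]
  rw [hA, hB]
  simp [List.reverse_reverse]
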